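-- pv_equiv track=rewrite | github.com/runeharlyk/vla-robotics | language_diagnostics/libero_prompt_variant_rollouts_split.py | _replace_first_action_verb
-- ===== SOURCE A (Python) =====
-- def _replace_first_action_verb(base_instruction: str) -> str:
--     lowered = base_instruction.lower()
--     replacements = [
--         ("pick up ", "grasp "),
--         ("pick ", "grasp "),
--         ("put ", "place "),
--         ("push ", "move "),
--         ("pull ", "drag "),
--         ("insert ", "place "),
--         ("plug ", "insert "),
--     ]
--     for src, dst in replacements:
--         if lowered.startswith(src):
--             return f"{dst}{base_instruction[len(src):]}"
--     return f"perform {base_instruction}"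
-- ===== SOURCE B (Python) =====
-- _VERBS = {
--     "pick": "grasp",
--     "put": "place",
--     "push": "move",
--     "pull": "drag",
--     "insert": "place",
--     "plug": "insert",
-- }
--
--
-- def _replace_first_action_verb(base_instruction: str) -> str:
--     lowered = base_instruction.lower()
--     i = lowered.find(" ")
--     dst = _VERBS.get(lowered[:i]) if i >= 0 else None
--     if dst is None:
--         return "perform " + base_instruction
--     n = 8 if lowered[:8] == "pick up " else i + 1
--     return dst + " " + base_instruction[n:]
-- ===== Notes on version B (the rewrite author's own statement) =====
-- stated objective: alternative
-- what changed: A sequentially scans seven (prefix, replacement) pairs calling startswith on each; B instead locates the first space once, looks the first word up in a dict of six verbs, and resolves the single two-word verb prefix with one slice comparison, so the match is a hash lookup keyed by the first word rather than a sequential prefix scan.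
import Mathlib
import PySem

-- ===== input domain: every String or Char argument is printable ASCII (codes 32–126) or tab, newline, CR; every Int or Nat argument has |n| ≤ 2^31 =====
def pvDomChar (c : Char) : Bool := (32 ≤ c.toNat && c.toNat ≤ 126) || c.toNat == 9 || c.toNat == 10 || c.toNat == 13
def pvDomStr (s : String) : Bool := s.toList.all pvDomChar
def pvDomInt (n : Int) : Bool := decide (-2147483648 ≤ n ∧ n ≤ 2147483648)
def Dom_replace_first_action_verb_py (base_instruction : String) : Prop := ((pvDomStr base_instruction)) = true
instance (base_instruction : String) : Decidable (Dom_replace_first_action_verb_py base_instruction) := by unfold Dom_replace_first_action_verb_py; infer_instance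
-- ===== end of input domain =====

-- B replaces A's sequential scan over seven (prefix, replacement) pairs by finding the
-- first space once, one dict lookup keyed by the first word, and a single slice
-- comparison for the lone two-word verb prefix (alternative decomposition).

-- Python string concatenation (f-string / '+'), kernel-transparent (shared by both ports)
def pvCat (a b : String) : String := String.ofList (a.toList ++ b.toList)

-- ===== PORT A =====
def pvReplacementsA : List (String × String) :=
  [("pick up ", "grasp "), ("pick ", "grasp "), ("put ", "place "),
   ("push ", "move "), ("pull ", "drag "), ("insert ", "place "), ("plug ", "insert ")]

def pvLoopA (base lowered : String) : List (String × String) → String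
  | [] => pvCat "perform " base
  | (src, dst) :: rest =>
    if PySem.Str.startswith lowered src then
      pvCat dst (PySem.Str.slice base (some (PySem.Str.len src)) none)
    else pvLoopA base lowered rest

def replace_first_action_verb_py (base_instruction : String) : String :=
  pvLoopA base_instruction (PySem.Str.lower base_instruction) pvReplacementsA

-- ===== PORT B =====
def pvVerbTable : PySem.Dict String String := PySem.Dict.ofList
  [("pick", "grasp"), ("put", "place"), ("push", "move"),
   ("pull", "drag"), ("insert", "place"), ("plug", "insert")]

def replace_first_action_verb_py_alt (base_instruction : String) : String :=
  let lowered := PySem.Str.lower base_instruction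
  let i := PySem.Str.find lowered " "
  let dst := if 0 ≤ i then pvVerbTable.get? (PySem.Str.slice lowered none (some i)) else none
  match dst with
  | none => pvCat "perform " base_instruction
  | some d =>
    let n : Int := if PySem.Str.slice lowered none (some 8) == "pick up " then 8 else i + 1
    pvCat d (pvCat " " (PySem.Str.slice base_instruction (some n) none))

-- ===== PRECONDITION & SPEC =====
def Spec_replace_first_action_verb_py (base_instruction : String) (out : String) : Prop := out = replace_first_action_verb_py_alt base_instruction
instance (base_instruction : String) (out : String) : Decidable (Spec_replace_first_action_verb_py base_instruction out) := by unfold Spec_replace_first_action_verb_py; infer_instance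

-- ===== CLAIM (what is proved, stated in full; the proofs are below) =====
def Claim_equal_replace_first_action_verb_py : Prop := ∀ (base_instruction : String), Dom_replace_first_action_verb_py base_instruction → Spec_replace_first_action_verb_py base_instruction (replace_first_action_verb_py base_instruction)

-- ===== LEMMAS AND PROOFS =====

lemma pv_str_eq_iff (a b : String) : (a == b) = decide (b.toList = a.toList) := by
  rcases Bool.eq_false_or_eq_true (a == b) with h | h <;> rw [h]
  · have he : a = b := by simpa using h
    simp [he]
  · have hne : a ≠ b := by simpa using h
    have h2 : ¬ (b.toList = a.toList) := fun e => hne (String.ext_iff.mpr e.symm)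
    simp [h2]

lemma pv_take_slice (t : String) (n : Int) (hn : 0 ≤ n) :
    (PySem.Str.slice t none (some n)).toList = t.toList.take n.toNat := by
  simp [PySem.Str.toList_slice, PySem.Chars.slice_eq_listSlice, PySem.List.slice_to t.toList hn]

lemma pv_tableB_get (u : String) :
    pvVerbTable.get? u =
      if u.toList = "pick".toList then some "grasp"
      else if u.toList = "put".toList then some "place"
      else if u.toList = "push".toList then some "move"
      else if u.toList = "pull".toList then some "drag"
      else if u.toList = "insert".toList then some "place"
      else if u.toList = "plug".toList then some "insert"
      else none := by
  have : pvVerbTable = PySem.Dict.mk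
      [("pick", "grasp"), ("put", "place"), ("push", "move"),
       ("pull", "drag"), ("insert", "place"), ("plug", "insert")] := rfl
  rw [this]
  simp only [PySem.Dict.get?_mk_cons, pv_str_eq_iff, decide_eq_true_eq]
  rfl

lemma pv_find_space_eq (l : List Char) (k : Nat)
    (h1 : [' '] <+: l.drop k) (h2 : ∀ i < k, ¬ [' '] <+: l.drop i) :
    PySem.Chars.find l [' '] = (k : Int) := by
  have hin : ([' '] : List Char) <:+: l := h1.isInfix.trans (List.drop_suffix k l).isInfix
  have h0 : 0 ≤ PySem.Chars.find l [' '] := (PySem.Chars.find_nonneg_iff l [' ']).mpr hin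
  obtain ⟨hp, hmin⟩ := PySem.Chars.find_spec h0
  have hfk : (PySem.Chars.find l [' ']).toNat = k := by
    rcases lt_trichotomy (PySem.Chars.find l [' ']).toNat k with h | h | h
    · exact absurd hp (h2 _ h)
    · exact h
    · exact absurd h1 (hmin k h)
  omega


lemma pv_nokey (l key : List Char) (k : Nat)
    (hsp : [' '] <+: l.drop k) (hnp : ¬ (key ++ [' ']) <+: l) : l.take k ≠ key := by
  intro e
  rcases le_or_gt k l.length with hle | hgt
  · apply hnp
    obtain ⟨r2, hr2⟩ := hsp
    refine ⟨r2, ?_⟩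
    calc key ++ [' '] ++ r2 = l.take k ++ ([' '] ++ r2) := by rw [e]; simp
    _ = l.take k ++ l.drop k := by rw [hr2]
    _ = l := List.take_append_drop k l
  · have h1 : l.drop k = [] := List.drop_eq_nil_of_le (le_of_lt hgt)
    rw [h1] at hsp
    exact absurd hsp (by simp)

lemma pv_cat_assoc (a b c : String) : pvCat a (pvCat b c) = pvCat (pvCat a b) c := by
  unfold pvCat
  simp

-- ===== VERDICT helper: the two bodies agree for every base and every lowered string t =====
lemma pv_master (base t : String) :
    pvLoopA base t pvReplacementsA =
      (match (if 0 ≤ PySem.Str.find t " " then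
                pvVerbTable.get? (PySem.Str.slice t none (some (PySem.Str.find t " ")))
              else none) with
       | none => pvCat "perform " base
       | some d =>
         pvCat d (pvCat " " (PySem.Str.slice base
           (some (if PySem.Str.slice t none (some 8) == "pick up " then (8 : Int)
                  else PySem.Str.find t " " + 1)) none))) := by
  by_cases hc1 : ['p','i','c','k',' ','u','p',' '] <+: t.toList
  · obtain ⟨r, hr⟩ := hc1
    have hf : PySem.Str.find t " " = (4 : Int) := by
      have h4 : PySem.Chars.find t.toList [' '] = (4 : Int) := by
        apply pv_find_space_eq
        · rw [← hr]; simp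
        · intro i hi; rw [← hr]; interval_cases i <;> simp
      simpa using h4
    have hget : pvVerbTable.get? (PySem.Str.slice t none (some (4 : Int))) = some "grasp" := by
      rw [pv_tableB_get, pv_take_slice t 4 (by norm_num), ← hr]; simp
    have h8 : (PySem.Str.slice t none (some 8) == "pick up ") = true := by
      rw [pv_str_eq_iff, pv_take_slice t 8 (by norm_num), ← hr]; simp
    have hc1' : ['p','i','c','k',' ','u','p',' '] <+: t.toList := ⟨r, hr⟩
    rw [hf]
    simp only [hget, h8]
    have hw : pvCat "grasp" " " = "grasp " := rfl
    simp [pvLoopA, pvReplacementsA, PySem.Str.startswith_eq, PySem.Chars.startswith_iff, hc1', pv_cat_assoc, hw]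
  · by_cases hc2 : ['p','i','c','k',' '] <+: t.toList
    · obtain ⟨r, hr⟩ := hc2
      have hf : PySem.Str.find t " " = (4 : Int) := by
        have h4 : PySem.Chars.find t.toList [' '] = (4 : Int) := by
          apply pv_find_space_eq
          · rw [← hr]; simp
          · intro i hi; rw [← hr]; interval_cases i <;> simp
        simpa using h4
      have hget : pvVerbTable.get? (PySem.Str.slice t none (some (4 : Int))) = some "grasp" := by
        rw [pv_tableB_get, pv_take_slice t 4 (by norm_num), ← hr]; simp
      have h8 : (PySem.Str.slice t none (some 8) == "pick up ") = false := by
        rw [pv_str_eq_iff, pv_take_slice t 8 (by norm_num)]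
        have h := (mt List.prefix_iff_eq_take.mpr) hc1
        simpa using h
      have hc2' : ['p','i','c','k',' '] <+: t.toList := ⟨r, hr⟩
      rw [hf]
      simp only [hget, h8]
      have hw : pvCat "grasp" " " = "grasp " := rfl
      simp [pvLoopA, pvReplacementsA, PySem.Str.startswith_eq, PySem.Chars.startswith_iff, hc1, hc2', pv_cat_assoc, hw]
    · by_cases hc3 : ['p','u','t',' '] <+: t.toList
      · obtain ⟨r, hr⟩ := hc3
        have hf : PySem.Str.find t " " = (3 : Int) := by
          have h4 : PySem.Chars.find t.toList [' '] = (3 : Int) := by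
            apply pv_find_space_eq
            · rw [← hr]; simp
            · intro i hi; rw [← hr]; interval_cases i <;> simp
          simpa using h4
        have hget : pvVerbTable.get? (PySem.Str.slice t none (some (3 : Int))) = some "place" := by
          rw [pv_tableB_get, pv_take_slice t 3 (by norm_num), ← hr]; simp
        have h8 : (PySem.Str.slice t none (some 8) == "pick up ") = false := by
          rw [pv_str_eq_iff, pv_take_slice t 8 (by norm_num), ← hr]; simp
        have hc3' : ['p','u','t',' '] <+: t.toList := ⟨r, hr⟩
        rw [hf]
        simp only [hget, h8]
        have hw : pvCat "place" " " = "place " := rfl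
        simp [pvLoopA, pvReplacementsA, PySem.Str.startswith_eq, PySem.Chars.startswith_iff, hc1, hc2, hc3', pv_cat_assoc, hw]
      · by_cases hc4 : ['p','u','s','h',' '] <+: t.toList
        · obtain ⟨r, hr⟩ := hc4
          have hf : PySem.Str.find t " " = (4 : Int) := by
            have h4 : PySem.Chars.find t.toList [' '] = (4 : Int) := by
              apply pv_find_space_eq
              · rw [← hr]; simp
              · intro i hi; rw [← hr]; interval_cases i <;> simp
            simpa using h4
          have hget : pvVerbTable.get? (PySem.Str.slice t none (some (4 : Int))) = some "move" := by
            rw [pv_tableB_get, pv_take_slice t 4 (by norm_num), ← hr]; simp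
          have h8 : (PySem.Str.slice t none (some 8) == "pick up ") = false := by
            rw [pv_str_eq_iff, pv_take_slice t 8 (by norm_num), ← hr]; simp
          have hc4' : ['p','u','s','h',' '] <+: t.toList := ⟨r, hr⟩
          rw [hf]
          simp only [hget, h8]
          have hw : pvCat "move" " " = "move " := rfl
          simp [pvLoopA, pvReplacementsA, PySem.Str.startswith_eq, PySem.Chars.startswith_iff, hc1, hc2, hc3, hc4', pv_cat_assoc, hw]
        · by_cases hc5 : ['p','u','l','l',' '] <+: t.toList
          · obtain ⟨r, hr⟩ := hc5
            have hf : PySem.Str.find t " " = (4 : Int) := by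
              have h4 : PySem.Chars.find t.toList [' '] = (4 : Int) := by
                apply pv_find_space_eq
                · rw [← hr]; simp
                · intro i hi; rw [← hr]; interval_cases i <;> simp
              simpa using h4
            have hget : pvVerbTable.get? (PySem.Str.slice t none (some (4 : Int))) = some "drag" := by
              rw [pv_tableB_get, pv_take_slice t 4 (by norm_num), ← hr]; simp
            have h8 : (PySem.Str.slice t none (some 8) == "pick up ") = false := by
              rw [pv_str_eq_iff, pv_take_slice t 8 (by norm_num), ← hr]; simp
            have hc5' : ['p','u','l','l',' '] <+: t.toList := ⟨r, hr⟩
            rw [hf]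
            simp only [hget, h8]
            have hw : pvCat "drag" " " = "drag " := rfl
            simp [pvLoopA, pvReplacementsA, PySem.Str.startswith_eq, PySem.Chars.startswith_iff, hc1, hc2, hc3, hc4, hc5', pv_cat_assoc, hw]
          · by_cases hc6 : ['i','n','s','e','r','t',' '] <+: t.toList
            · obtain ⟨r, hr⟩ := hc6
              have hf : PySem.Str.find t " " = (6 : Int) := by
                have h4 : PySem.Chars.find t.toList [' '] = (6 : Int) := by
                  apply pv_find_space_eq
                  · rw [← hr]; simp
                  · intro i hi; rw [← hr]; interval_cases i <;> simp
                simpa using h4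
              have hget : pvVerbTable.get? (PySem.Str.slice t none (some (6 : Int))) = some "place" := by
                rw [pv_tableB_get, pv_take_slice t 6 (by norm_num), ← hr]; simp
              have h8 : (PySem.Str.slice t none (some 8) == "pick up ") = false := by
                rw [pv_str_eq_iff, pv_take_slice t 8 (by norm_num), ← hr]; simp
              have hc6' : ['i','n','s','e','r','t',' '] <+: t.toList := ⟨r, hr⟩
              rw [hf]
              simp only [hget, h8]
              have hw : pvCat "place" " " = "place " := rfl
              simp [pvLoopA, pvReplacementsA, PySem.Str.startswith_eq, PySem.Chars.startswith_iff, hc1, hc2, hc3, hc4, hc5, hc6', pv_cat_assoc, hw]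
            · by_cases hc7 : ['p','l','u','g',' '] <+: t.toList
              · obtain ⟨r, hr⟩ := hc7
                have hf : PySem.Str.find t " " = (4 : Int) := by
                  have h4 : PySem.Chars.find t.toList [' '] = (4 : Int) := by
                    apply pv_find_space_eq
                    · rw [← hr]; simp
                    · intro i hi; rw [← hr]; interval_cases i <;> simp
                  simpa using h4
                have hget : pvVerbTable.get? (PySem.Str.slice t none (some (4 : Int))) = some "insert" := by
                  rw [pv_tableB_get, pv_take_slice t 4 (by norm_num), ← hr]; simp
                have h8 : (PySem.Str.slice t none (some 8) == "pick up ") = false := by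
                  rw [pv_str_eq_iff, pv_take_slice t 8 (by norm_num), ← hr]; simp
                have hc7' : ['p','l','u','g',' '] <+: t.toList := ⟨r, hr⟩
                rw [hf]
                simp only [hget, h8]
                have hw : pvCat "insert" " " = "insert " := rfl
                simp [pvLoopA, pvReplacementsA, PySem.Str.startswith_eq, PySem.Chars.startswith_iff, hc1, hc2, hc3, hc4, hc5, hc6, hc7', pv_cat_assoc, hw]
              · -- no prefix matches: both sides return "perform " ++ base
                have hA : pvLoopA base t pvReplacementsA = pvCat "perform " base := by
                  simp [pvLoopA, pvReplacementsA, PySem.Str.startswith_eq, PySem.Chars.startswith_iff, hc1, hc2, hc3, hc4, hc5, hc6, hc7]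
                rw [hA]
                by_cases hi : 0 ≤ PySem.Str.find t " "
                · have hi' : 0 ≤ PySem.Chars.find t.toList [' '] := by simpa using hi
                  obtain ⟨hsp, _⟩ := PySem.Chars.find_spec hi'
                  set k := (PySem.Chars.find t.toList [' ']).toNat with hk
                  have hfk : PySem.Str.find t " " = (k : Int) := by
                    simp [hk, Int.toNat_of_nonneg hi']
                  have n1 : t.toList.take k ≠ ['p','i','c','k'] := pv_nokey _ ['p','i','c','k'] _ hsp (by simpa using hc2)
                  have n2 : t.toList.take k ≠ ['p','u','t'] := pv_nokey _ ['p','u','t'] _ hsp (by simpa using hc3)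
                  have n3 : t.toList.take k ≠ ['p','u','s','h'] := pv_nokey _ ['p','u','s','h'] _ hsp (by simpa using hc4)
                  have n4 : t.toList.take k ≠ ['p','u','l','l'] := pv_nokey _ ['p','u','l','l'] _ hsp (by simpa using hc5)
                  have n5 : t.toList.take k ≠ ['i','n','s','e','r','t'] := pv_nokey _ ['i','n','s','e','r','t'] _ hsp (by simpa using hc6)
                  have n6 : t.toList.take k ≠ ['p','l','u','g'] := pv_nokey _ ['p','l','u','g'] _ hsp (by simpa using hc7)
                  have hget : pvVerbTable.get? (PySem.Str.slice t none (some ((k : Int)))) = none := by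
                    rw [pv_tableB_get, pv_take_slice t k (by positivity)]
                    simp [n1, n2, n3, n4, n5, n6]
                  rw [hfk]
                  simp only [hget, if_pos (by positivity : (0:Int) ≤ (k:Int))]
                · simp only [if_neg hi]


lemma pv_final (s : String) :
    replace_first_action_verb_py s = replace_first_action_verb_py_alt s := by
  unfold replace_first_action_verb_py replace_first_action_verb_py_alt
  exact pv_master s (PySem.Str.lower s)

-- ===== VERDICT (by name: the statement is the Claim_ definition above) =====
theorem replace_first_action_verb_py_spec : Claim_equal_replace_first_action_verb_py := by
  intro s _
  exact pv_final s
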